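-- pv_equiv track=rewrite | github.com/shweta1122/Data-Structures | RearrangeArrayAlternate.py | alternate
-- ===== SOURCE A (Python) =====
-- def alternate(l):
--     l1 = []
--     a = len(l)
--     counter = 0
--     for i in range(0, len(l)):
--         if(i % 2 != 0):
--             l1.append(l[counter])
--             counter += 1
--         else:
--             l1.append(l[a-1])
--             a = a-1
--
--     return l1
-- ===== SOURCE B (Python) =====
-- def alternate(l):
--     h = len(l) // 2
--     front = l[:h]
--     back = list(reversed(l[h:]))
--     out = []
--     for b, f in zip(back, front):
--         out.append(b)
--         out.append(f)
--     if len(l) % 2 == 1: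
--         out.append(back[-1])
--     return out
-- ===== Notes on version B (the rewrite author's own statement) =====
-- stated objective: simpler
-- what changed: Replaced A's single loop with two moving cursors (a counting down from the end, counter up from the front) and per-iteration parity branching by a slice-based decomposition: front half, reversed back half, interleaved with zip, plus the odd-length leftover.
import Mathlib
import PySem

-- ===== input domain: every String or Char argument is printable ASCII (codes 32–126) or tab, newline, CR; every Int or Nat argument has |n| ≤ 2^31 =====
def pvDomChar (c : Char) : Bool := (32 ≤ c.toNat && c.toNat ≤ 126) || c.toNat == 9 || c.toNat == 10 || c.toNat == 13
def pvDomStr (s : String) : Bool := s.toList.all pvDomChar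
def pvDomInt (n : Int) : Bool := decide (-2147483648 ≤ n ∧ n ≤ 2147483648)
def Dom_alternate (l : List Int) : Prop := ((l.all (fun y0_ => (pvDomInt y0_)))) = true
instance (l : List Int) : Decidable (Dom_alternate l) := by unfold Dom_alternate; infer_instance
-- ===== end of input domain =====

-- B replaces A's single index-juggling loop (two moving cursors `a`, `counter`) by slicing the
-- list into its two halves, reversing the back half, and zipping — objective: simpler decomposition.

-- ===== PORT A =====
-- literal transliteration of A: one loop over range(len(l)), state (l1, a, counter);
-- l[counter] and l[a-1] are always in range, so the total pyGetD form is exact here.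
def alternate (l : List Int) : List Int :=
  (PySem.List.pyRange 0 (l.length : Int) 1).foldl
    (fun (st : List Int × Int × Int) i =>
      if PySem.Int.mod i 2 ≠ 0 then
        (st.1 ++ [PySem.List.pyGetD l st.2.2 0], st.2.1, st.2.2 + 1)
      else
        (st.1 ++ [PySem.List.pyGetD l (st.2.1 - 1) 0], st.2.1 - 1, st.2.2))
    ([], (l.length : Int), 0) |>.1

-- ===== PORT B =====
-- literal transliteration of Source B: front = l[:h], back = reversed(l[h:]), interleave via zip,
-- append back[-1] when the length is odd.
def alternate_alt (l : List Int) : List Int :=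
  let h : Int := PySem.Int.floordiv (l.length : Int) 2
  let front := PySem.List.slice l none (some h)
  let back := (PySem.List.slice l (some h) none).reverse
  let out := (back.zip front).foldl (fun out p => out ++ [p.1, p.2]) []
  if PySem.Int.mod (l.length : Int) 2 = 1 then out ++ [PySem.List.pyGetD back (-1) 0]
  else out

-- ===== PRECONDITION & SPEC =====
def Spec_alternate (l : List Int) (out : List Int) : Prop := out = alternate_alt l
instance (l : List Int) (out : List Int) : Decidable (Spec_alternate l out) := by
  unfold Spec_alternate; infer_instance

-- ===== CLAIM =====
def Claim_equal_alternate : Prop := ∀ (l : List Int), Dom_alternate l → Spec_alternate l (alternate l)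

-- ===== LEMMAS AND PROOFS =====
-- the value both programs place at output position j
def pvPick (l : List Int) (j : Nat) : Int :=
  if j % 2 = 1 then l.getD (j / 2) 0 else l.getD (l.length - 1 - j / 2) 0

lemma loopA_inv (l : List Int) : ∀ k : Nat, k ≤ l.length →
    (PySem.List.pyRange 0 (k : Int) 1).foldl
      (fun (st : List Int × Int × Int) i =>
        if PySem.Int.mod i 2 ≠ 0 then
          (st.1 ++ [PySem.List.pyGetD l st.2.2 0], st.2.1, st.2.2 + 1)
        else
          (st.1 ++ [PySem.List.pyGetD l (st.2.1 - 1) 0], st.2.1 - 1, st.2.2))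
      ([], (l.length : Int), 0)
    = ((List.range k).map (pvPick l),
       ((l.length : Int) - ((k + 1) / 2 : Nat)), ((k / 2 : Nat) : Int)) := by
  intro k
  induction k with
  | zero => intro _; simp [PySem.List.pyRange_zero_nat]
  | succ k ih =>
    intro hk
    have hk' : k ≤ l.length := Nat.le_of_succ_le hk
    have hrange : PySem.List.pyRange 0 ((k+1 : Nat) : Int) 1
        = PySem.List.pyRange 0 (k : Int) 1 ++ [(k : Int)] := by
      push_cast
      exact PySem.List.pyRange_one_succ_right (by positivity)
    rw [hrange, List.foldl_append, ih hk']
    simp only [List.foldl_cons, List.foldl_nil]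
    rcases Nat.even_or_odd k with he | ho
    · -- k even: i % 2 = 0 branch
      obtain ⟨m, hm⟩ := he
      have hmod : PySem.Int.mod (k : Int) 2 = 0 := by
        rw [show ((2:Int)) = ((2:Nat):Int) by norm_num, PySem.Int.mod_natCast]
        omega
      simp only [hmod, ne_eq, not_true_eq_false, if_false, not_false_iff]
      have hidx : ((l.length : Int) - ((k+1)/2 : Nat)) - 1 = ((l.length - 1 - k/2 : Nat) : Int) := by
        omega
      rw [hidx, PySem.List.pyGetD_natCast]
      refine Prod.ext ?_ (Prod.ext ?_ ?_)
      · simp only [List.range_succ, List.map_append, List.map_cons, List.map_nil]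
        congr 1
        simp [pvPick]
        omega
      · simp; omega
      · simp; omega
    · obtain ⟨m, hm⟩ := ho
      have hmod : PySem.Int.mod (k : Int) 2 = 1 := by
        rw [show ((2:Int)) = ((2:Nat):Int) by norm_num, PySem.Int.mod_natCast]
        omega
      simp only [hmod, ne_eq, if_true, one_ne_zero, not_false_iff]
      rw [PySem.List.pyGetD_natCast]
      refine Prod.ext ?_ (Prod.ext ?_ ?_)
      · simp only [List.range_succ, List.map_append, List.map_cons, List.map_nil]
        congr 1
        simp [pvPick]
        omega
      · simp; omega
      · simp; omega

lemma A_char (l : List Int) : alternate l = (List.range l.length).map (pvPick l) := by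
  unfold alternate
  rw [loopA_inv l l.length le_rfl]

lemma inter_char : ∀ (bs fs : List Int),
    ((bs.zip fs).flatMap fun p => [p.1, p.2])
    = (List.range (2 * min bs.length fs.length)).map
        (fun j => if j % 2 = 1 then fs.getD (j / 2) 0 else bs.getD (j / 2) 0) := by
  intro bs
  induction bs with
  | nil => intro fs; simp
  | cons b bs ih =>
    intro fs
    cases fs with
    | nil => simp
    | cons f fs =>
      have hrw : 2 * min (b :: bs).length (f :: fs).length
          = 2 * min bs.length fs.length + 1 + 1 := by simp; omega
      rw [hrw, List.range_succ_eq_map, List.range_succ_eq_map]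
      simp only [List.zip_cons_cons, List.flatMap_cons, ih fs, List.map_cons, List.map_map]
      have hfun : ((fun j => if j % 2 = 1 then (f :: fs).getD (j / 2) 0 else (b :: bs).getD (j / 2) 0) ∘ Nat.succ ∘ Nat.succ) = (fun j => if j % 2 = 1 then fs.getD (j / 2) 0 else bs.getD (j / 2) 0) := by
        funext j
        have h2 : (j + 2) % 2 = j % 2 := by omega
        have h3 : (j + 2) / 2 = j / 2 + 1 := by omega
        simp [Function.comp, Nat.succ_eq_add_one, show j + 1 + 1 = j + 2 from rfl, h2, h3]
      rw [hfun]
      norm_num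

lemma B_char (l : List Int) : alternate_alt l = (List.range l.length).map (pvPick l) := by
  unfold alternate_alt
  dsimp only
  have h2 : ((2:Int)) = ((2:Nat):Int) := by norm_num
  rw [h2, PySem.Int.floordiv_natCast, PySem.Int.mod_natCast,
      PySem.List.slice_to_natCast, PySem.List.slice_from_natCast,
      PySem.List.foldl_append_eq_flatMap, List.nil_append, inter_char]
  have hlen : min (l.drop (l.length / 2)).reverse.length (l.take (l.length / 2)).length
      = l.length / 2 := by simp; omega
  rw [hlen]
  have hmain : (List.range (2 * (l.length / 2))).map
      (fun j => if j % 2 = 1 then (l.take (l.length / 2)).getD (j / 2) 0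
                else (l.drop (l.length / 2)).reverse.getD (j / 2) 0)
      = (List.range (2 * (l.length / 2))).map (pvPick l) := by
    apply List.map_congr_left
    intro j hj
    rw [List.mem_range] at hj
    unfold pvPick
    by_cases hp : j % 2 = 1
    · simp only [hp, if_true]
      have hb : j / 2 < (l.take (l.length / 2)).length := by simp; omega
      have hb' : j / 2 < l.length := by simp at hb; omega
      rw [List.getD_eq_getElem _ _ hb, List.getD_eq_getElem _ _ hb', List.getElem_take]
    · simp only [hp, if_false]
      have hb : j / 2 < (l.drop (l.length / 2)).reverse.length := by simp; omega
      have hb' : l.length - 1 - j / 2 < l.length := by simp at hb; omega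
      rw [List.getD_eq_getElem _ _ hb, List.getD_eq_getElem _ _ hb',
          List.getElem_reverse, List.getElem_drop]
      congr 1
      simp only [List.length_reverse, List.length_drop] at hb ⊢
      omega
  rw [hmain]
  by_cases hodd' : ((l.length % 2 : Nat) : Int) = 1
  · have hodd : l.length % 2 = 1 := by omega
    rw [if_pos hodd']
    have hne : (l.drop (l.length / 2)).reverse ≠ [] := by
      simp
      omega
    rw [PySem.List.pyGetD_neg_one _ _ hne]
    have hlast : (l.drop (l.length / 2)).reverse.getLast hne = pvPick l (2 * (l.length / 2)) := by
      have hb : (l.drop (l.length / 2)).reverse.length - 1 < (l.drop (l.length / 2)).reverse.length := by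
        simp only [List.length_reverse, List.length_drop]; omega
      rw [List.getLast_eq_getElem, List.getElem_reverse, List.getElem_drop]
      unfold pvPick
      have : ¬ (2 * (l.length / 2)) % 2 = 1 := by omega
      simp only [this, if_false]
      rw [List.getD_eq_getElem _ _ (by omega : l.length - 1 - 2 * (l.length / 2) / 2 < l.length)]
      congr 1
      simp only [List.length_reverse, List.length_drop]
      omega
    rw [hlast]
    conv_rhs => rw [show l.length = 2 * (l.length / 2) + 1 by omega]
    rw [List.range_succ, List.map_append, List.map_cons, List.map_nil]
  · have hodd : l.length % 2 = 0 := by omega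
    rw [if_neg hodd']
    congr 2
    omega

-- ===== VERDICT =====
theorem alternate_spec : Claim_equal_alternate := by
  intro l _
  unfold Spec_alternate
  rw [A_char, B_char]
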